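-- pv_equiv track=rewrite | github.com/JeremyMorlier/NNToChips | stages/optimized_tiled_workload_generation.py | _get_divisors_bounded
-- ===== SOURCE A (Python) =====
-- def _get_divisors_bounded(value: int, upper_bound: int) -> list[int]:
--     if value <= 0:
--         return [1]
--     divisors: list[int] = []
--     max_k = min(value, upper_bound)
--     for k in range(1, max_k + 1):
--         if value % k == 0:
--             divisors.append(k)
--     return divisors
-- ===== SOURCE B (Python) =====
-- def _get_divisors_bounded(value: int, upper_bound: int) -> list[int]:
--     if value <= 0:
--         return [1]
--     small = []
--     large = []
--     i = 1
--     while i * i <= value: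
--         if value % i == 0:
--             small.append(i)
--             d = value // i
--             if d != i:
--                 large.append(d)
--         i += 1
--     return [d for d in small + large[::-1] if d <= upper_bound]
-- ===== Notes on version B (the rewrite author's own statement) =====
-- stated objective: faster
-- what changed: B enumerates divisor pairs (i, value//i) only up to sqrt(value) and concatenates the small divisors with the reversed large ones, then filters by upper_bound, instead of trial-dividing every k up to min(value, upper_bound).
import Mathlib
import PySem

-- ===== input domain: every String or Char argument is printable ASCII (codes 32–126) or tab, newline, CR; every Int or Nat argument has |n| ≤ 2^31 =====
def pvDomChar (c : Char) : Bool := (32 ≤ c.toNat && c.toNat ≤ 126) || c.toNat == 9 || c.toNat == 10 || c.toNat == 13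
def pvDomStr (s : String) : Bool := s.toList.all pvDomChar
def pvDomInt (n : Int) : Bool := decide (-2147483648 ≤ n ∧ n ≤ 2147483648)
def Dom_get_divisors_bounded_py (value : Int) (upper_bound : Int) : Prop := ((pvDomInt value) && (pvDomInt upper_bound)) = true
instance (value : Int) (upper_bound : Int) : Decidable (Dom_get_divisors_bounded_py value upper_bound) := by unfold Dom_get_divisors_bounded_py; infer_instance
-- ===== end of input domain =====

-- B replaces A's trial division over every k up to min(value, upper_bound) by enumeration of
-- divisor pairs (i, value // i) up to sqrt(value) (objective: faster, asymptotically).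

-- ===== PORT A =====
def get_divisors_bounded_py (value : Int) (upper_bound : Int) : List Int :=
  if value ≤ 0 then [1]
  else
    let max_k := min value upper_bound
    (PySem.List.pyRange 1 (max_k + 1) 1).foldl
      (fun divisors k => if PySem.Int.mod value k == 0 then divisors ++ [k] else divisors) []

-- ===== PORT B =====
-- the 'while i * i <= value' loop of Source B, carrying the two accumulators `small` and `large`
def pvBLoop (value : Int) (i : Int) (small : List Int) (large : List Int) : List Int × List Int :=
  if h : i * i ≤ value then
    if PySem.Int.mod value i == 0 then
      let d := PySem.Int.floordiv value i
      pvBLoop value (i + 1) (small ++ [i]) (if d ≠ i then large ++ [d] else large)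
    else
      pvBLoop value (i + 1) small large
  else
    (small, large)
termination_by (value + 1 - i).toNat
decreasing_by
  all_goals
    have hii : i ≤ i * i := by
      nlinarith [mul_self_nonneg i, mul_self_nonneg (i - 1)]
    omega

def get_divisors_bounded_py_alt (value : Int) (upper_bound : Int) : List Int :=
  if value ≤ 0 then [1]
  else
    let sl := pvBLoop value 1 [] []
    -- large[::-1] is List.reverse (exact for a full negative-step slice)
    (sl.1 ++ sl.2.reverse).filter (fun d => d ≤ upper_bound)

-- ===== PRECONDITION & SPEC =====
def Spec_get_divisors_bounded_py (value : Int) (upper_bound : Int) (out : List Int) : Prop := out = get_divisors_bounded_py_alt value upper_bound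
instance (value : Int) (upper_bound : Int) (out : List Int) : Decidable (Spec_get_divisors_bounded_py value upper_bound out) := by unfold Spec_get_divisors_bounded_py; infer_instance

-- ===== CLAIM (what is proved, stated in full; the proofs are below) =====
def Claim_equal_get_divisors_bounded_py : Prop := ∀ (value : Int) (upper_bound : Int), Dom_get_divisors_bounded_py value upper_bound → Spec_get_divisors_bounded_py value upper_bound (get_divisors_bounded_py value upper_bound)

-- ===== LEMMAS AND PROOFS =====

-- the integer square root of value, as an Int
def pvS (value : Int) : Int := (Nat.sqrt value.toNat : Int)

lemma pvS_sq_le {value : Int} (hv : 1 ≤ value) : pvS value * pvS value ≤ value := by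
  have h : ((Nat.sqrt value.toNat : Int)) ^ 2 ≤ ((value.toNat : Nat) : Int) := by
    exact_mod_cast Nat.sqrt_le' value.toNat
  rw [Int.toNat_of_nonneg (by omega : (0:Int) ≤ value)] at h
  simp only [pvS]
  nlinarith [h]

lemma pvS_lt_succ_sq {value : Int} (hv : 1 ≤ value) : value < (pvS value + 1) * (pvS value + 1) := by
  have h : ((value.toNat : Nat) : Int) < ((Nat.sqrt value.toNat : Int) + 1) ^ 2 := by
    exact_mod_cast Nat.lt_succ_sqrt' value.toNat
  rw [Int.toNat_of_nonneg (by omega : (0:Int) ≤ value)] at h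
  simp only [pvS]
  nlinarith [h]

lemma pvS_pos {value : Int} (hv : 1 ≤ value) : 1 ≤ pvS value := by
  by_contra h
  have hs0 : 0 ≤ pvS value := by simp [pvS]
  have := pvS_lt_succ_sq hv
  nlinarith

-- loop condition vs. the square root bound
lemma pv_cond_iff {value i : Int} (hv : 1 ≤ value) (hi : 1 ≤ i) :
    i * i ≤ value ↔ i ≤ pvS value := by
  constructor
  · intro h
    by_contra hgt
    have h1 : pvS value + 1 ≤ i := by omega
    have h0 : 0 ≤ pvS value + 1 := by have := pvS_pos hv; omega
    have := pvS_lt_succ_sq hv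
    nlinarith
  · intro h
    have := pvS_sq_le hv
    nlinarith

-- the pair-enumeration loop, closed form: the remaining small/large divisors for k in [i, √value]
lemma pvBLoop_eq (value i : Int) (hv : 1 ≤ value) (hi : 1 ≤ i) (small large : List Int) :
    pvBLoop value i small large =
      (small ++ (PySem.List.pyRange i (pvS value + 1) 1).filter
          (fun k => PySem.Int.mod value k == 0),
       large ++ ((PySem.List.pyRange i (pvS value + 1) 1).filter
          (fun k => PySem.Int.mod value k == 0 && !(PySem.Int.floordiv value k == k))).map
          (fun k => PySem.Int.floordiv value k)) := by
  rw [pvBLoop]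
  by_cases h : i * i ≤ value
  · have hle : i ≤ pvS value := (pv_cond_iff hv hi).mp h
    have hcons : PySem.List.pyRange i (pvS value + 1) 1 = i :: PySem.List.pyRange (i+1) (pvS value + 1) 1 :=
      PySem.List.pyRange_one_cons (by omega)
    rw [dif_pos h, hcons]
    by_cases hm : PySem.Int.mod value i == 0
    · rw [if_pos hm]
      rw [pvBLoop_eq value (i+1) hv (by omega)]
      by_cases hd : PySem.Int.floordiv value i ≠ i
      · simp [hm, hd, List.filter_cons]
      · simp [hm, hd, List.filter_cons]
    · rw [if_neg hm]
      rw [pvBLoop_eq value (i+1) hv (by omega)]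
      simp [List.filter_cons, hm]
  · have hgt : ¬ i ≤ pvS value := fun hle => h ((pv_cond_iff hv hi).mpr hle)
    rw [dif_neg h, PySem.List.pyRange_one_eq_nil (by omega)]
    simp
termination_by (value + 1 - i).toNat
decreasing_by
  all_goals
    have hii : i ≤ i * i := by
      calc i = i * 1 := by ring
        _ ≤ i * i := by exact mul_le_mul_of_nonneg_left hi (by omega)
    omega

-- two strictly increasing lists with the same members are equal
lemma pv_eq_of_pairwise_lt {l1 l2 : List Int}
    (h1 : l1.Pairwise (· < ·)) (h2 : l2.Pairwise (· < ·))
    (hm : ∀ x, x ∈ l1 ↔ x ∈ l2) : l1 = l2 := by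
  have n1 : l1.Nodup := h1.imp (fun h => ne_of_lt h)
  have n2 : l2.Nodup := h2.imp (fun h => ne_of_lt h)
  have hp : l1.Perm l2 := (List.perm_ext_iff_of_nodup n1 n2).mpr hm
  exact List.Perm.eq_of_pairwise
    (fun a b _ _ hab hba => absurd hba (not_lt.mpr hab.le)) h1 h2 hp

-- basic arithmetic facts about a divisor pair k * (value/k) = value
lemma pv_dvd_of_mem {value k : Int} (hv : 1 ≤ value) (hk : 1 ≤ k) :
    (PySem.Int.mod value k == 0) = true ↔ k ∣ value := by
  rw [beq_iff_eq, PySem.Int.mod_eq_zero_iff_dvd]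

lemma pv_floordiv_pos {value k : Int} (hk : 0 < k) :
    PySem.Int.floordiv value k = value / k :=
  PySem.Int.floordiv_eq_ediv_of_pos hk

lemma pv_quot_mul {value k : Int} (hk : k ≠ 0) (hd : k ∣ value) :
    (value / k) * k = value := Int.ediv_mul_cancel hd

-- the large divisor value/k of a small divisor k (k ≤ √value, value/k ≠ k) exceeds √value
lemma pv_large_gt {value k : Int} (hv : 1 ≤ value) (hk : 1 ≤ k)
    (hks : k ≤ pvS value) (hd : k ∣ value) (hne : value / k ≠ k) :
    pvS value < value / k := by
  have hmul : (value / k) * k = value := pv_quot_mul (by omega) hd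
  have hs := pvS_sq_le hv
  have hkk : k * k < value := by
    rcases lt_or_eq_of_le (show k * k ≤ value by nlinarith) with h | h
    · exact h
    · exfalso; apply hne
      have : value / k = (k * k) / k := by rw [h]
      rw [this, Int.mul_ediv_cancel_left _ (by omega : k ≠ 0)]
  have hklt : k < value / k := by nlinarith
  by_contra hle
  push_neg at hle
  nlinarith

lemma pv_small_filter_mem {value k : Int} (hv : 1 ≤ value) :
    k ∈ (PySem.List.pyRange 1 (pvS value + 1) 1).filter
        (fun k => PySem.Int.mod value k == 0) ↔
      1 ≤ k ∧ k ≤ pvS value ∧ k ∣ value := by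
  simp only [List.mem_filter, PySem.List.mem_pyRange_one]
  constructor
  · rintro ⟨⟨h1, h2⟩, h3⟩
    exact ⟨h1, by omega, (pv_dvd_of_mem hv h1).mp h3⟩
  · rintro ⟨h1, h2, h3⟩
    exact ⟨⟨h1, by omega⟩, (pv_dvd_of_mem hv h1).mpr h3⟩

lemma pv_large_filter_mem {value k : Int} (hv : 1 ≤ value) :
    k ∈ (PySem.List.pyRange 1 (pvS value + 1) 1).filter
        (fun k => PySem.Int.mod value k == 0 && !(PySem.Int.floordiv value k == k)) ↔
      1 ≤ k ∧ k ≤ pvS value ∧ k ∣ value ∧ value / k ≠ k := by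
  simp only [List.mem_filter, PySem.List.mem_pyRange_one, Bool.and_eq_true, Bool.not_eq_true',
    beq_eq_false_iff_ne]
  constructor
  · rintro ⟨⟨h1, h2⟩, h3, h4⟩
    rw [pv_floordiv_pos (by omega)] at h4
    exact ⟨h1, by omega, (pv_dvd_of_mem hv h1).mp h3, h4⟩
  · rintro ⟨h1, h2, h3, h4⟩
    refine ⟨⟨h1, by omega⟩, (pv_dvd_of_mem hv h1).mpr h3, ?_⟩
    rw [pv_floordiv_pos (by omega)]
    exact h4

-- membership in small ++ large.reverse is exactly "divisor of value in [1, value]"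
lemma pv_all_divs_mem {value k : Int} (hv : 1 ≤ value) :
    (k ∈ (PySem.List.pyRange 1 (pvS value + 1) 1).filter
        (fun k => PySem.Int.mod value k == 0) ++
      (((PySem.List.pyRange 1 (pvS value + 1) 1).filter
        (fun k => PySem.Int.mod value k == 0 && !(PySem.Int.floordiv value k == k))).map
        (fun k => PySem.Int.floordiv value k)).reverse) ↔
      1 ≤ k ∧ k ≤ value ∧ k ∣ value := by
  rw [List.mem_append, List.mem_reverse, List.mem_map]
  constructor
  · rintro (h | ⟨j, hj, rfl⟩)
    · rw [pv_small_filter_mem hv] at h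
      obtain ⟨h1, h2, h3⟩ := h
      have hs := pvS_sq_le hv
      have hsp := pvS_pos hv
      exact ⟨h1, by nlinarith, h3⟩
    · rw [pv_large_filter_mem hv] at hj
      obtain ⟨h1, h2, h3, h4⟩ := hj
      rw [pv_floordiv_pos (by omega)]
      have hmul : (value / j) * j = value := pv_quot_mul (by omega) h3
      refine ⟨?_, ?_, ⟨j, hmul.symm⟩⟩
      · rw [Int.le_ediv_iff_mul_le (by omega : (0:Int) < j)]
        have hs := pvS_sq_le hv
        have hsp := pvS_pos hv
        nlinarith
      · exact Int.ediv_le_self j (by omega)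
  · rintro ⟨h1, h2, h3⟩
    by_cases hks : k ≤ pvS value
    · exact Or.inl ((pv_small_filter_mem hv).mpr ⟨h1, hks, h3⟩)
    · push_neg at hks
      set d := value / k with hd
      have hmul : d * k = value := pv_quot_mul (by omega) h3
      have hsp := pvS_pos hv
      have hssq := pvS_sq_le hv
      have hlt := pvS_lt_succ_sq hv
      have hd1 : 1 ≤ d := by
        rw [hd, Int.le_ediv_iff_mul_le (by omega : (0:Int) < k)]
        omega
      have hdk : d < k := by nlinarith
      have hdd : d * d < value := by nlinarith
      have hds : d ≤ pvS value := by
        by_contra hc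
        push_neg at hc
        nlinarith
      have hddvd : d ∣ value := ⟨k, hmul.symm⟩
      have hkd : value / d = k := by
        rw [← hmul, mul_comm]
        exact Int.mul_ediv_cancel _ (by omega)
      refine Or.inr ⟨d, (pv_large_filter_mem hv).mpr ⟨hd1, hds, hddvd, by omega⟩, ?_⟩
      rw [pv_floordiv_pos (by omega : (0:Int) < d), hkd]

-- small ++ large.reverse is strictly increasing
lemma pv_all_divs_pairwise (value : Int) (hv : 1 ≤ value) :
    ((PySem.List.pyRange 1 (pvS value + 1) 1).filter
        (fun k => PySem.Int.mod value k == 0) ++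
      (((PySem.List.pyRange 1 (pvS value + 1) 1).filter
        (fun k => PySem.Int.mod value k == 0 && !(PySem.Int.floordiv value k == k))).map
        (fun k => PySem.Int.floordiv value k)).reverse).Pairwise (· < ·) := by
  rw [List.pairwise_append]
  have hrange : (PySem.List.pyRange 1 (pvS value + 1) 1).Pairwise (· < ·) :=
    PySem.List.pairwise_lt_pyRange_one 1 (pvS value + 1)
  refine ⟨hrange.filter _, ?_, ?_⟩
  · rw [List.pairwise_reverse, List.pairwise_map]
    have hfil := (hrange.filter
      (fun k => PySem.Int.mod value k == 0 && !(PySem.Int.floordiv value k == k)))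
    refine List.Pairwise.imp_of_mem ?_ hfil
    intro a b ha hb hab
    rw [pv_large_filter_mem hv] at ha hb
    obtain ⟨ha1, ha2, ha3, _⟩ := ha
    obtain ⟨hb1, hb2, hb3, _⟩ := hb
    rw [pv_floordiv_pos (by omega : (0:Int) < a), pv_floordiv_pos (by omega : (0:Int) < b)]
    have hma : (value / a) * a = value := pv_quot_mul (by omega) ha3
    have hmb : (value / b) * b = value := pv_quot_mul (by omega) hb3
    have h1 : 1 ≤ value / a := by nlinarith
    nlinarith
  · intro a ha b hb
    rw [pv_small_filter_mem hv] at ha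
    rw [List.mem_reverse, List.mem_map] at hb
    obtain ⟨j, hj, rfl⟩ := hb
    rw [pv_large_filter_mem hv] at hj
    obtain ⟨hj1, hj2, hj3, hj4⟩ := hj
    rw [pv_floordiv_pos (by omega : (0:Int) < j)]
    have := pv_large_gt hv hj1 hj2 hj3 hj4
    omega

-- A's foldl as a filter over its range
lemma pv_A_eq_filter (value upper_bound : Int) (hv : ¬ value ≤ 0) :
    get_divisors_bounded_py value upper_bound =
      (PySem.List.pyRange 1 (min value upper_bound + 1) 1).filter
        (fun k => PySem.Int.mod value k == 0) := by
  rw [get_divisors_bounded_py, if_neg hv]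
  exact PySem.List.foldl_append_if_eq_filter _ _ _

lemma pv_A_mem {value upper_bound k : Int} (hv : 1 ≤ value) :
    k ∈ (PySem.List.pyRange 1 (min value upper_bound + 1) 1).filter
        (fun k => PySem.Int.mod value k == 0) ↔
      1 ≤ k ∧ k ≤ value ∧ k ≤ upper_bound ∧ k ∣ value := by
  simp only [List.mem_filter, PySem.List.mem_pyRange_one]
  constructor
  · rintro ⟨⟨h1, h2⟩, h3⟩
    exact ⟨h1, by omega, by omega, (pv_dvd_of_mem hv h1).mp h3⟩
  · rintro ⟨h1, h2, h3, h4⟩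
    exact ⟨⟨h1, by omega⟩, (pv_dvd_of_mem hv h1).mpr h4⟩

-- ===== VERDICT (by name: the statement is the Claim_ definition above) =====
theorem get_divisors_bounded_py_spec : Claim_equal_get_divisors_bounded_py := by
  intro value upper_bound _
  unfold Spec_get_divisors_bounded_py
  by_cases hv : value ≤ 0
  · simp [get_divisors_bounded_py, get_divisors_bounded_py_alt, hv]
  · have hv1 : 1 ≤ value := by omega
    rw [pv_A_eq_filter value upper_bound hv]
    rw [get_divisors_bounded_py_alt, if_neg hv,
      pvBLoop_eq value 1 hv1 le_rfl [] []]
    simp only [List.nil_append]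
    apply pv_eq_of_pairwise_lt
    · exact (PySem.List.pairwise_lt_pyRange_one 1 (min value upper_bound + 1)).filter _
    · exact (pv_all_divs_pairwise value hv1).filter _
    · intro x
      rw [pv_A_mem hv1, List.mem_filter, pv_all_divs_mem hv1]
      simp only [decide_eq_true_eq]
      constructor
      · rintro ⟨h1, h2, h3, h4⟩; exact ⟨⟨h1, h2, h4⟩, h3⟩
      · rintro ⟨⟨h1, h2, h4⟩, h3⟩; exact ⟨h1, h2, h3, h4⟩
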